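-- pv_equiv track=rewrite | github.com/andigud/Sumerian-Translator-Python | sumtrans.py | svo_to_sov
-- ===== SOURCE A (Python) =====
-- def svo_to_sov(sentence):
--     words = sentence.split()
--     verbs = ['eats', 'eat', 'are', 'was', 'were', 'has', 'have', 'had', 'do', 'does', 'did', 'can', 'could', 'will', 'would', 'shall', 'should', 'may', 'might', 'must',
--              'make', 'made', 'come', 'came', 'take', 'took', 'give', 'gave', 'get', 'got', 'go', 'went', 'say', 'said', 'see', 'saw', 'know', 'knew', 'think', 'thought',
--              'want', 'wanted', 'work', 'worked', 'call', 'called', 'try', 'tried', 'need', 'needed', 'feel', 'felt', 'become', 'became', 'leave', 'left', 'put', 'put',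
--              'mean', 'meant', 'keep', 'kept', 'let', 'lets', 'begin', 'began', 'show', 'showed', 'hear', 'heard', 'play', 'played', 'run', 'ran', 'move', 'moved', 'live',
--              'lived', 'believe', 'believed', 'bring', 'brought', 'happen', 'happened', 'write', 'wrote', 'sit', 'sat', 'stand', 'stood', 'lose', 'lost', 'pay', 'paid',
--              'meet', 'met', 'include', 'included', 'continue', 'continued', 'set', 'sets', 'learn', 'learned', 'change', 'changed', 'win', 'won', 'understand', 'understood', 'hate']
--
--     verb_index = -1
--
--     # Find the index of the verb in the sentence
--     for i, word in enumerate(words):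
--         if word.lower() in verbs:
--             verb_index = i
--             break
--
--     # If verb is found, move it to the end of the sentence
--     if verb_index != -1:
--         verb = words.pop(verb_index)
--         words.append(verb)
--
--     # Rec*onstruct the sentence
--     sov_sentence = ' '.join(words)
--
--     return sov_sentence
-- ===== SOURCE B (Python) =====
-- VERBS = ("eats eat are was were has have had do does did can could will "
--          "would shall should may might must make made come came take took give gave "
--          "get got go went say said see saw know knew think thought want wanted "
--          "work worked call called try tried need needed feel felt become became leave left "
--          "put mean meant keep kept let lets begin began show showed hear heard play "
--          "played run ran move moved live lived believe believed bring brought happen happened write "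
--          "wrote sit sat stand stood lose lost pay paid meet met include included continue "
--          "continued set sets learn learned change changed win won understand understood "
--          "hate").split()
--
--
-- def svo_to_sov(sentence):
--     result = []
--     verb = None
--     for word in sentence.split():
--         if verb is None and word.lower() in VERBS:
--             verb = word
--         else:
--             result.append(word)
--     if verb is not None:
--         result.append(verb)
--     return ' '.join(result)
-- ===== Notes on version B (the rewrite author's own statement) =====
-- stated objective: alternative
-- what changed: Replaces find-index-then-pop-then-append by a single pass that withholds the first verb in an accumulator and appends it after the loop, with the verb table stored as one space-separated string split once instead of a hand-written list literal.
import Mathlib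
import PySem

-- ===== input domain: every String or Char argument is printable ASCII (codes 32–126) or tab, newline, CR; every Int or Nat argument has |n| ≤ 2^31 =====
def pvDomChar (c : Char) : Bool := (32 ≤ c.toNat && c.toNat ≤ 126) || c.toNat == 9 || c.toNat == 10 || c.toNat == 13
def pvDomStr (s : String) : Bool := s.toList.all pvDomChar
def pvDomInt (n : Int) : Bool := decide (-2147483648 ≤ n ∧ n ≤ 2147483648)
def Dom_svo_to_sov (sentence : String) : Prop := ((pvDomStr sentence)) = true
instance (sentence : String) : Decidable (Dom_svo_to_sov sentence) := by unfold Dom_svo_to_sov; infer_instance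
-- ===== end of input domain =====

-- B replaces A's find-index / pop / append by a single pass that withholds the
-- first verb and appends it after the loop, with the verb table kept as one
-- space-separated string split once; return values agree on every input.

-- ===== PORT A =====
def verbsA : List String := ["eats", "eat", "are", "was", "were", "has", "have", "had", "do", "does", "did", "can", "could", "will", "would", "shall", "should", "may", "might", "must",
  "make", "made", "come", "came", "take", "took", "give", "gave", "get", "got", "go", "went", "say", "said", "see", "saw", "know", "knew", "think", "thought",
  "want", "wanted", "work", "worked", "call", "called", "try", "tried", "need", "needed", "feel", "felt", "become", "became", "leave", "left", "put", "put",
  "mean", "meant", "keep", "kept", "let", "lets", "begin", "began", "show", "showed", "hear", "heard", "play", "played", "run", "ran", "move", "moved", "live",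
  "lived", "believe", "believed", "bring", "brought", "happen", "happened", "write", "wrote", "sit", "sat", "stand", "stood", "lose", "lost", "pay", "paid",
  "meet", "met", "include", "included", "continue", "continued", "set", "sets", "learn", "learned", "change", "changed", "win", "won", "understand", "understood", "hate"]

-- the 'for i, word in enumerate(words): if …: verb_index = i; break' loop
def findVerbIdxA : List String → Int → Int
  | [], _ => -1
  | w :: ws, i => if verbsA.contains (PySem.Str.lower w) then i else findVerbIdxA ws (i + 1)

def svo_to_sov (sentence : String) : String :=
  let words := PySem.Str.split₀ sentence
  let verb_index := findVerbIdxA words 0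
  let words' :=
    if verb_index ≠ -1 then
      match PySem.List.pop? words verb_index with
      | some (verb, rest) => rest ++ [verb]   -- words.pop(verb_index); words.append(verb)
      | none => words                          -- unreachable: the found index is in range
    else words
  PySem.Str.join " " words'

-- ===== PORT B =====
-- VERBS = ("eats eat …" " shall …" … " … hate").split()  (Source B's adjacent string
-- literals concatenate; Python's implicit concatenation is ported as ++)
def verbsB : List String := PySem.Str.split₀
  ("eats eat are was were has have had do does did can could will "
   ++ "would shall should may might must make made come came take took give gave "
   ++ "get got go went say said see saw know knew think thought want wanted "
   ++ "work worked call called try tried need needed feel felt become became leave left "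
   ++ "put mean meant keep kept let lets begin began show showed hear heard play "
   ++ "played run ran move moved live lived believe believed bring brought happen happened write "
   ++ "wrote sit sat stand stood lose lost pay paid meet met include included continue "
   ++ "continued set sets learn learned change changed win won understand understood "
   ++ "hate")

-- one step of B's loop over (result, verb)
def stepB (acc : List String × Option String) (word : String) : List String × Option String :=
  match acc.2 with
  | none => if verbsB.contains (PySem.Str.lower word) then (acc.1, some word) else (acc.1 ++ [word], none)
  | some v => (acc.1 ++ [word], some v)

def svo_to_sov_alt (sentence : String) : String :=
  let acc := (PySem.Str.split₀ sentence).foldl stepB ([], none)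
  let result := match acc.2 with
    | some v => acc.1 ++ [v]
    | none => acc.1
  PySem.Str.join " " result

-- ===== PRECONDITION & SPEC =====
def Spec_svo_to_sov (sentence : String) (out : String) : Prop := out = svo_to_sov_alt sentence
instance (sentence : String) (out : String) : Decidable (Spec_svo_to_sov sentence out) := by unfold Spec_svo_to_sov; infer_instance

-- ===== CLAIM (what is proved, stated in full; the proofs are below) =====
def Claim_equal_svo_to_sov : Prop := ∀ (sentence : String), Dom_svo_to_sov sentence → Spec_svo_to_sov sentence (svo_to_sov sentence)

-- ===== LEMMAS AND PROOFS =====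

-- the word-is-a-verb test used to characterise A
def isVerb (w : String) : Bool := verbsA.contains (PySem.Str.lower w)

-- verbsA with the duplicate "put" made explicit; verbsB is the same list with one "put"
def vPre : List String := ["eats", "eat", "are", "was", "were", "has", "have", "had", "do", "does", "did", "can", "could", "will", "would", "shall", "should", "may", "might", "must",
  "make", "made", "come", "came", "take", "took", "give", "gave", "get", "got", "go", "went", "say", "said", "see", "saw", "know", "knew", "think", "thought",
  "want", "wanted", "work", "worked", "call", "called", "try", "tried", "need", "needed", "feel", "felt", "become", "became", "leave", "left"]

def vSuf : List String := ["mean", "meant", "keep", "kept", "let", "lets", "begin", "began", "show", "showed", "hear", "heard", "play", "played", "run", "ran", "move", "moved", "live",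
  "lived", "believe", "believed", "bring", "brought", "happen", "happened", "write", "wrote", "sit", "sat", "stand", "stood", "lose", "lost", "pay", "paid",
  "meet", "met", "include", "included", "continue", "continued", "set", "sets", "learn", "learned", "change", "changed", "win", "won", "understand", "understood", "hate"]

lemma verbsA_split : verbsA = vPre ++ "put" :: "put" :: vSuf := by rfl

-- split₀.go consumes one non-space character
lemma go_char (c : Char) (rest cur : List Char) (acc : List (List Char))
    (h : PySem.Chars.isspace c = false) :
    PySem.Chars.split₀.go (c :: rest) cur acc = PySem.Chars.split₀.go rest (c :: cur) acc := by
  rw [PySem.Chars.split₀.go]; simp [h]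

-- split₀.go closes the current word at a space
lemma go_space (rest cur : List Char) (acc : List (List Char)) (h : cur ≠ []) :
    PySem.Chars.split₀.go (' ' :: rest) cur acc = PySem.Chars.split₀.go rest [] (cur.reverse :: acc) := by
  rw [PySem.Chars.split₀.go]; simp [PySem.Chars.isspace, List.isEmpty_eq_false_iff.mpr h]

-- split₀.go finishes, emitting the last word
lemma go_finish (cur : List Char) (acc : List (List Char)) (h : cur ≠ []) :
    PySem.Chars.split₀.go [] cur acc = acc.reverse ++ [cur.reverse] := by
  rw [PySem.Chars.split₀.go]; simp [List.isEmpty_eq_false_iff.mpr h]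

-- split₀.go consumes a whole space-free word
lemma go_word (w : List Char) (rest cur : List Char) (acc : List (List Char))
    (h : ∀ c ∈ w, PySem.Chars.isspace c = false) :
    PySem.Chars.split₀.go (w ++ rest) cur acc = PySem.Chars.split₀.go rest (w.reverse ++ cur) acc := by
  induction w generalizing cur with
  | nil => simp
  | cons c w' ih =>
    rw [List.cons_append, go_char c (w' ++ rest) cur acc (h c (List.mem_cons_self))]
    rw [ih (c :: cur) (fun d hd => h d (List.mem_cons_of_mem c hd))]
    simp

def chF (ws : List (List Char)) : List Char := ws.flatMap (fun w => w ++ [' '])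

-- split₀.go consumes a run of nonempty space-free words, each followed by one space
lemma go_chunk (ws : List (List Char)) (rest : List Char) (acc : List (List Char))
    (h : ∀ w ∈ ws, w ≠ [] ∧ ∀ ch ∈ w, PySem.Chars.isspace ch = false) :
    PySem.Chars.split₀.go (chF ws ++ rest) [] acc
      = PySem.Chars.split₀.go rest [] (ws.reverse ++ acc) := by
  induction ws generalizing acc with
  | nil => simp [chF]
  | cons w ws' ih =>
    obtain ⟨hw0, hwc⟩ := h w List.mem_cons_self
    have hsh : chF (w :: ws') ++ rest = w ++ (' ' :: (chF ws' ++ rest)) := by simp [chF]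
    have ih' := ih ((w.reverse ++ []).reverse :: acc)
      (fun v hv => h v (List.mem_cons_of_mem w hv))
    rw [hsh, go_word w _ [] acc hwc,
      go_space _ (w.reverse ++ []) acc (by simpa using hw0), ih']
    simp

-- a lowercase ASCII letter is not Python whitespace
lemma isspace_lower (c : Char) (h1 : 97 ≤ c.toNat) (h2 : c.toNat ≤ 122) :
    PySem.Chars.isspace c = false := by
  simp only [PySem.Chars.isspace]
  simp only [Bool.or_eq_false_iff, Bool.and_eq_false_iff, decide_eq_false_iff_not]
  omega

-- the go_chunk side condition follows from one boolean scan
lemma chunk_ok (ws : List (List Char))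
    (h : ws.all (fun w => !w.isEmpty && w.all (fun ch => 97 ≤ ch.toNat && ch.toNat ≤ 122)) = true) :
    ∀ w ∈ ws, w ≠ [] ∧ ∀ ch ∈ w, PySem.Chars.isspace ch = false := by
  intro w hw
  rw [List.all_eq_true] at h
  obtain ⟨h0, hc⟩ := Bool.and_eq_true_iff.mp (h w hw)
  refine ⟨by simpa using h0, fun ch hch => ?_⟩
  rw [List.all_eq_true] at hc
  obtain ⟨b1, b2⟩ := Bool.and_eq_true_iff.mp (hc ch hch)
  exact isspace_lower ch (by simpa using b1) (by simpa using b2)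

def c1 : List (List Char) := List.map String.toList ["eats", "eat", "are", "was", "were", "has", "have", "had", "do", "does", "did", "can", "could", "will"]
def c2 : List (List Char) := List.map String.toList ["would", "shall", "should", "may", "might", "must", "make", "made", "come", "came", "take", "took", "give", "gave"]
def c3 : List (List Char) := List.map String.toList ["get", "got", "go", "went", "say", "said", "see", "saw", "know", "knew", "think", "thought", "want", "wanted"]
def c4 : List (List Char) := List.map String.toList ["work", "worked", "call", "called", "try", "tried", "need", "needed", "feel", "felt", "become", "became", "leave", "left"]
def c5 : List (List Char) := List.map String.toList ["put", "mean", "meant", "keep", "kept", "let", "lets", "begin", "began", "show", "showed", "hear", "heard", "play"]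
def c6 : List (List Char) := List.map String.toList ["played", "run", "ran", "move", "moved", "live", "lived", "believe", "believed", "bring", "brought", "happen", "happened", "write"]
def c7 : List (List Char) := List.map String.toList ["wrote", "sit", "sat", "stand", "stood", "lose", "lost", "pay", "paid", "meet", "met", "include", "included", "continue"]
def c8 : List (List Char) := List.map String.toList ["continued", "set", "sets", "learn", "learned", "change", "changed", "win", "won", "understand", "understood"]

lemma piece1 : ("eats eat are was were has have had do does did can could will " : String).toList = chF c1 := by simp [chF, c1]
lemma piece2 : ("would shall should may might must make made come came take took give gave " : String).toList = chF c2 := by simp [chF, c2]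
lemma piece3 : ("get got go went say said see saw know knew think thought want wanted " : String).toList = chF c3 := by simp [chF, c3]
lemma piece4 : ("work worked call called try tried need needed feel felt become became leave left " : String).toList = chF c4 := by simp [chF, c4]
lemma piece5 : ("put mean meant keep kept let lets begin began show showed hear heard play " : String).toList = chF c5 := by simp [chF, c5]
lemma piece6 : ("played run ran move moved live lived believe believed bring brought happen happened write " : String).toList = chF c6 := by simp [chF, c6]
lemma piece7 : ("wrote sit sat stand stood lose lost pay paid meet met include included continue " : String).toList = chF c7 := by simp [chF, c7]
lemma piece8 : ("continued set sets learn learned change changed win won understand understood " : String).toList = chF c8 := by simp [chF, c8]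

lemma ok1 : ∀ w ∈ c1, w ≠ [] ∧ ∀ ch ∈ w, PySem.Chars.isspace ch = false :=
  chunk_ok c1 (by simp [c1])
lemma ok2 : ∀ w ∈ c2, w ≠ [] ∧ ∀ ch ∈ w, PySem.Chars.isspace ch = false :=
  chunk_ok c2 (by simp [c2])
lemma ok3 : ∀ w ∈ c3, w ≠ [] ∧ ∀ ch ∈ w, PySem.Chars.isspace ch = false :=
  chunk_ok c3 (by simp [c3])
lemma ok4 : ∀ w ∈ c4, w ≠ [] ∧ ∀ ch ∈ w, PySem.Chars.isspace ch = false :=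
  chunk_ok c4 (by simp [c4])
lemma ok5 : ∀ w ∈ c5, w ≠ [] ∧ ∀ ch ∈ w, PySem.Chars.isspace ch = false :=
  chunk_ok c5 (by simp [c5])
lemma ok6 : ∀ w ∈ c6, w ≠ [] ∧ ∀ ch ∈ w, PySem.Chars.isspace ch = false :=
  chunk_ok c6 (by simp [c6])
lemma ok7 : ∀ w ∈ c7, w ≠ [] ∧ ∀ ch ∈ w, PySem.Chars.isspace ch = false :=
  chunk_ok c7 (by simp [c7])
lemma ok8 : ∀ w ∈ c8, w ≠ [] ∧ ∀ ch ∈ w, PySem.Chars.isspace ch = false :=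
  chunk_ok c8 (by simp [c8])

set_option maxRecDepth 4000 in
lemma verbsB_split : verbsB = vPre ++ "put" :: vSuf := by
  unfold verbsB PySem.Str.split₀ PySem.Chars.split₀
  simp only [String.toList_append, List.append_assoc]
  rw [piece1, piece2, piece3, piece4, piece5, piece6, piece7, piece8]
  rw [go_chunk c1 _ _ ok1]
  rw [go_chunk c2 _ _ ok2]
  rw [go_chunk c3 _ _ ok3]
  rw [go_chunk c4 _ _ ok4]
  rw [go_chunk c5 _ _ ok5]
  rw [go_chunk c6 _ _ ok6]
  rw [go_chunk c7 _ _ ok7]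
  rw [go_chunk c8 _ _ ok8]
  have hh := chunk_ok [['h', 'a', 't', 'e']] (by simp) ['h', 'a', 't', 'e'] List.mem_cons_self
  rw [show ("hate" : String).toList = ('h' :: 'a' :: 't' :: 'e' :: []) ++ [] from by simp]
  rw [go_word _ _ [] _ hh.2, go_finish _ _ (by simp)]
  simp [c1, c2, c3, c4, c5, c6, c7, c8, vPre, vSuf]

lemma contains_verbsB (s : String) : verbsB.contains s = verbsA.contains s := by
  rw [Bool.eq_iff_iff, verbsB_split, verbsA_split]
  simp only [List.contains_iff_mem, List.mem_append, List.mem_cons]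
  tauto

lemma findVerbIdxA_eq (ws : List String) (i : Int) :
    findVerbIdxA ws i = (match ws.findIdx? isVerb with
      | some k => i + k
      | none => -1) := by
  induction ws generalizing i with
  | nil => simp [findVerbIdxA]
  | cons w ws ih =>
    rw [findVerbIdxA, List.findIdx?_cons]
    cases hv : isVerb w with
    | true =>
      rw [show (verbsA.contains (PySem.Str.lower w)) = true from hv]
      simp
    | false =>
      rw [show (verbsA.contains (PySem.Str.lower w)) = false from hv]
      simp only [Bool.false_eq_true, if_false, ih]
      cases hf : List.findIdx? isVerb ws <;> simp [Int.add_assoc, Int.add_comm 1]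

-- the simple specification both ports meet: move the first verb to the end
def moveVerb : List String → List String
  | [] => []
  | w :: ws => if isVerb w then ws ++ [w] else w :: moveVerb ws

lemma moveVerb_of_none (ws : List String) (h : ws.findIdx? isVerb = none) :
    moveVerb ws = ws := by
  induction ws with
  | nil => rfl
  | cons w ws ih =>
    rw [List.findIdx?_cons] at h
    cases hv : isVerb w with
    | true => simp [hv] at h
    | false =>
      simp only [hv, Bool.false_eq_true, if_false] at h
      simp [moveVerb, hv, ih (Option.map_eq_none_iff.mp h)]

lemma moveVerb_of_some (ws : List String) (k : Nat) (h : ws.findIdx? isVerb = some k) :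
    ∃ hk : k < ws.length, moveVerb ws = ws.eraseIdx k ++ [ws[k]] := by
  induction ws generalizing k with
  | nil => simp at h
  | cons w ws ih =>
    rw [List.findIdx?_cons] at h
    cases hv : isVerb w with
    | true =>
      simp [hv] at h
      subst h
      exact ⟨by simp, by simp [moveVerb, hv]⟩
    | false =>
      simp [hv] at h
      obtain ⟨k', hk', rfl⟩ := h
      obtain ⟨hb, he⟩ := ih k' hk'
      exact ⟨by simpa using Nat.succ_lt_succ hb, by simp [moveVerb, hv, he]⟩

-- A's list computation equals moveVerb
lemma portA_list (ws : List String) :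
    (if findVerbIdxA ws 0 ≠ -1 then
       match PySem.List.pop? ws (findVerbIdxA ws 0) with
       | some (verb, rest) => rest ++ [verb]
       | none => ws
     else ws) = moveVerb ws := by
  rw [findVerbIdxA_eq]
  cases hf : ws.findIdx? isVerb with
  | none => simp [moveVerb_of_none ws hf]
  | some k =>
    obtain ⟨hk, he⟩ := moveVerb_of_some ws k hf
    have h0 : (0 : Int) + k = (k : Int) := by omega
    have hne : (k : Int) ≠ -1 := by omega
    simp only [h0]
    rw [if_pos hne, PySem.List.pop?_natCast ws k hk, he]

-- B's fold with a found verb just copies the rest of the words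
lemma foldB_some (ws : List String) (r : List String) (v : String) :
    ws.foldl stepB (r, some v) = (r ++ ws, some v) := by
  induction ws generalizing r with
  | nil => simp
  | cons w ws ih => simp [List.foldl_cons, stepB, ih]

-- B's finished fold equals r ++ moveVerb ws
lemma portB_list (ws : List String) (r : List String) :
    (match (ws.foldl stepB (r, none)).2 with
      | some v => (ws.foldl stepB (r, none)).1 ++ [v]
      | none => (ws.foldl stepB (r, none)).1) = r ++ moveVerb ws := by
  induction ws generalizing r with
  | nil => simp [moveVerb]
  | cons w ws ih =>
    rw [List.foldl_cons]
    cases hv : isVerb w with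
    | true =>
      have hc : verbsB.contains (PySem.Str.lower w) = true := by
        rw [contains_verbsB]; exact hv
      rw [show stepB (r, none) w = (r, some w) by
        simp [stepB, List.mem_of_elem_eq_true hc]]
      rw [foldB_some]
      simp [moveVerb, hv]
    | false =>
      have hc : verbsB.contains (PySem.Str.lower w) = false := by
        rw [contains_verbsB]; exact hv
      have hm : PySem.Str.lower w ∉ verbsB := by simpa using hc
      rw [show stepB (r, none) w = (r ++ [w], none) by simp [stepB, hm]]
      rw [ih (r ++ [w])]
      simp [moveVerb, hv]

-- ===== VERDICT (by name: the statement is the Claim_ definition above) =====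
theorem svo_to_sov_spec : Claim_equal_svo_to_sov := by
  intro sentence _
  unfold Spec_svo_to_sov svo_to_sov svo_to_sov_alt
  have hA := portA_list (PySem.Str.split₀ sentence)
  have hB := portB_list (PySem.Str.split₀ sentence) []
  simp only at hA hB ⊢
  rw [hA, hB]
  simp
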